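-- pv_equiv track=rewrite | github.com/nateshv54/DSA | Arrays/Prefix and Suffix sum/XOR query.py | xorQuery
-- ===== SOURCE A (Python) =====
-- def xorQuery(queries):
--     ans = []
--     xorArray = [0] * (10**5 + 1)
--
--     for i in range(len(queries)):
--         if queries[i][0] == 1:
--             ans.append(queries[i][1])
--         else:
--             xorArray[0] ^= queries[i][1]
--             xorArray[len(ans)] ^= queries[i][1]
--
--     for i in range(len(ans)):
--         if i == 0:
--             ans[i] = ans[i] ^ xorArray[i]
--         else:
--             xorArray[i] ^= xorArray[i - 1]
--             ans[i] ^= xorArray[i]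
--
--     return ans
-- ===== SOURCE B (Python) =====
-- def xorQuery(queries):
--     acc = 0
--     out = []
--     for q in reversed(queries):
--         if q[0] == 1:
--             out.append(q[1] ^ acc)
--         else:
--             acc ^= q[1]
--     return out[::-1]
-- ===== Notes on version B (the rewrite author's own statement) =====
-- stated objective: simpler
-- what changed: Replaces A's preallocated 10^5+1 difference array plus a second prefix-XOR pass by a single reverse sweep over the queries with one running XOR accumulator (type-1 queries emit value ^ acc, other queries fold their value into acc), dropping the array and the second pass entirely.
-- outside the precondition, e.g. on xorQuery([[1]]): A raises IndexError, B raises IndexError; on xorQuery([[2, 7], [1]]): A raises IndexError, B raises IndexError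
import Mathlib
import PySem

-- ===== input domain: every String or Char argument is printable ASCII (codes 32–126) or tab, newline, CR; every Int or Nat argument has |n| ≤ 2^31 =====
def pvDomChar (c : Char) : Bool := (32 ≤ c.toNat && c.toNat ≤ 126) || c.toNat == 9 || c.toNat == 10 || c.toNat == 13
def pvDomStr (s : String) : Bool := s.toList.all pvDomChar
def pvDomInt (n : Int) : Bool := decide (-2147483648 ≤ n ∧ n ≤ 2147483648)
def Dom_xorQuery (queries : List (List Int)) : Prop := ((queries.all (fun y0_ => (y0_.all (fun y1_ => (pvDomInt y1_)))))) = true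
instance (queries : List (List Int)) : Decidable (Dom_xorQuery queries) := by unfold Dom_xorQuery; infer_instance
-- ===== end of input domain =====

-- B replaces A's fixed 10^5+1 difference array and prefix-XOR pass by one reverse sweep with a
-- running XOR accumulator: simpler, and free of the array bound (outside Pre_ A raises IndexError).

-- ===== PORT A =====
-- first loop body: append on a type-1 query, toggle diff-array ends on an update
def xorStep1 (st : List Int × List Int) (q : List Int) : List Int × List Int :=
  if q.getD 0 0 = 1 then (st.1 ++ [q.getD 1 0], st.2)
  else
    let xa1 := st.2.set 0 (PySem.Int.bxor (st.2.getD 0 0) (q.getD 1 0))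
    (st.1, xa1.set st.1.length (PySem.Int.bxor (xa1.getD st.1.length 0) (q.getD 1 0)))

-- second loop body: prefix-XOR the diff array in place and fold it into ans
def xorStep2 (st : List Int × List Int) (i : Nat) : List Int × List Int :=
  if i = 0 then (st.1.set 0 (PySem.Int.bxor (st.1.getD 0 0) (st.2.getD 0 0)), st.2)
  else
    let xa := st.2.set i (PySem.Int.bxor (st.2.getD i 0) (st.2.getD (i-1) 0))
    (st.1.set i (PySem.Int.bxor (st.1.getD i 0) (xa.getD i 0)), xa)

-- list indexing is via List.getD: under Pre_ every index A reads/writes is in range, so this is exact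
def xorQuery (queries : List (List Int)) : List Int :=
  let st := queries.foldl xorStep1 ([], List.replicate (10 ^ 5 + 1) 0)
  ((List.range st.1.length).foldl xorStep2 st).1

-- ===== PORT B =====
def xorStep_alt (st : List Int × Int) (q : List Int) : List Int × Int :=
  if q.getD 0 0 = 1 then (st.1 ++ [PySem.Int.bxor (q.getD 1 0) st.2], st.2)
  else (st.1, PySem.Int.bxor st.2 (q.getD 1 0))

def xorQuery_alt (queries : List (List Int)) : List Int :=
  (queries.reverse.foldl xorStep_alt ([], 0)).1.reverse

-- ===== PRECONDITION & SPEC =====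
-- Pre_ excludes (a) queries shorter than 2 elements, on which A raises IndexError, and
-- (b) inputs with more than 10^5 type-1 queries, on which A's fixed-size 10^5+1 array overflows
-- (IndexError); the bound is one query conservative: with exactly 10^5+1 type-1 queries and no
-- update after the last of them A still returns, and B agrees there.
def Pre_xorQuery (queries : List (List Int)) : Prop :=
  (∀ q ∈ queries, 2 ≤ q.length) ∧
    queries.countP (fun q => q.getD 0 0 == 1) ≤ 100000
instance (queries : List (List Int)) : Decidable (Pre_xorQuery queries) := by
  unfold Pre_xorQuery; infer_instance

def pvWitness_xorQuery : List (List Int) := [[1, 3], [2, 5], [1, 2], [3, 4], [1, 0]]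

def Spec_xorQuery (queries : List (List Int)) (out : List Int) : Prop := out = xorQuery_alt queries
instance (queries : List (List Int)) (out : List Int) : Decidable (Spec_xorQuery queries out) := by
  unfold Spec_xorQuery; infer_instance

-- ===== CLAIM (what is proved, stated in full; the proofs are below) =====
def Claim_equal_xorQuery : Prop :=
  ∀ (queries : List (List Int)), Dom_xorQuery queries → Pre_xorQuery queries →
    Spec_xorQuery queries (xorQuery queries)

-- ===== LEMMAS AND PROOFS =====

-- XOR algebra on PySem.Int.bxor (assoc is not in the prelude's lemma list)
theorem pvBxorAssoc (a b c : Int) :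
    PySem.Int.bxor (PySem.Int.bxor a b) c = PySem.Int.bxor a (PySem.Int.bxor b c) := by
  have hfix : ∀ (X : Nat), (-(-(X : Int) - 1) - 1) = (X : Int) := fun X => by ring
  simp only [PySem.Int.bxor]
  split_ifs <;>
    first
      | (exfalso; omega)
      | (simp only [hfix, Int.toNat_natCast]; congr 1; rw [Nat.xor_assoc])

theorem pvBxorCancel (a b : Int) : PySem.Int.bxor (PySem.Int.bxor a b) b = a := by
  rw [pvBxorAssoc]; simp

theorem pvBxorShuffle (a b u : Int) :
    PySem.Int.bxor (PySem.Int.bxor a u) (PySem.Int.bxor b u) = PySem.Int.bxor a b := by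
  rw [pvBxorAssoc, PySem.Int.bxor_comm b u, ← pvBxorAssoc u u b]
  simp [PySem.Int.bxor_comm]

-- getD/set facts specialised to Int lists (stated in the getElem? normal form simp produces)
theorem pvGetDSetNe (l : List Int) (i j : Nat) (v d : Int) (h : j ≠ i) :
    (l.set i v)[j]?.getD d = l[j]?.getD d := by
  rw [List.getElem?_set_ne (Ne.symm h)]

theorem pvGetDSetSelf (l : List Int) (i : Nat) (v d : Int) (h : i < l.length) :
    (l.set i v)[i]?.getD d = v := by
  simp [h]

theorem pvBxorRightComm (a b c : Int) :
    PySem.Int.bxor (PySem.Int.bxor a b) c = PySem.Int.bxor (PySem.Int.bxor a c) b := by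
  rw [pvBxorAssoc, PySem.Int.bxor_comm b c, ← pvBxorAssoc]

theorem pvBxorLeftComm (a b c : Int) :
    PySem.Int.bxor a (PySem.Int.bxor b c) = PySem.Int.bxor b (PySem.Int.bxor a c) := by
  rw [← pvBxorAssoc, PySem.Int.bxor_comm a b, pvBxorAssoc]

theorem pvGetDOfFn (n : Nat) (f : Fin n → Int) (i : Nat) (h : i < n) (d : Int) :
    (List.ofFn f)[i]?.getD d = f ⟨i, h⟩ := by
  rw [List.getElem?_ofFn]
  simp [h]

-- reference functional computation: one back-to-front pass (res, acc)
def specGo : List (List Int) → List Int × Int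
  | [] => ([], 0)
  | q :: rest =>
    let st := specGo rest
    if q.getD 0 0 = 1 then ((PySem.Int.bxor (q.getD 1 0) st.2) :: st.1, st.2)
    else (st.1, PySem.Int.bxor st.2 (q.getD 1 0))

-- prefix XOR of the diff array (reads with default 0, like the port)
def pxor (xa : List Int) : Nat → Int
  | 0 => xa[0]?.getD 0
  | i + 1 => PySem.Int.bxor (pxor xa i) (xa[i + 1]?.getD 0)

theorem pvAltEqSpec (qs : List (List Int)) : xorQuery_alt qs = (specGo qs).1 := by
  unfold xorQuery_alt
  rw [List.foldl_reverse]
  have h : qs.foldr (fun x y => xorStep_alt y x) ([], 0)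
      = ((specGo qs).1.reverse, (specGo qs).2) := by
    induction qs with
    | nil => rfl
    | cons q rest ih =>
      rw [List.foldr_cons, ih]
      by_cases hq : (q[0]?.getD 0 : Int) = 1 <;>
        simp [xorStep_alt, specGo, hq]
  rw [h]; simp

theorem pvSpecLen (qs : List (List Int)) :
    (specGo qs).1.length = qs.countP (fun q => q.getD 0 0 == 1) := by
  induction qs with
  | nil => rfl
  | cons q rest ih =>
    by_cases hq : (q[0]?.getD 0 : Int) = 1 <;>
      simp [specGo, hq, ih]

theorem pvSpecSnocOne (qs : List (List Int)) (q : List Int) (h : q.getD 0 0 = 1) :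
    specGo (qs ++ [q]) = ((specGo qs).1 ++ [q.getD 1 0], (specGo qs).2) := by
  rw [List.getD_eq_getElem?_getD] at h
  induction qs with
  | nil => simp [specGo, h]
  | cons q' rest ih =>
    by_cases hq : (q'[0]?.getD 0 : Int) = 1 <;>
      simp [specGo, hq, ih]

theorem pvSpecSnocUpd (qs : List (List Int)) (q : List Int) (h : ¬ q.getD 0 0 = 1) :
    specGo (qs ++ [q]) =
      ((specGo qs).1.map (fun x => PySem.Int.bxor x (q.getD 1 0)),
       PySem.Int.bxor (specGo qs).2 (q.getD 1 0)) := by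
  rw [List.getD_eq_getElem?_getD] at h
  induction qs with
  | nil => simp [specGo, h]
  | cons q' rest ih =>
    by_cases hq : (q'[0]?.getD 0 : Int) = 1 <;>
      simp [specGo, hq, ih] <;>
        simp [pvBxorLeftComm, PySem.Int.bxor_comm]

theorem pvPxorSetHigh (xa : List Int) (j : Nat) (v : Int) (i : Nat) (h : i < j) :
    pxor (xa.set j v) i = pxor xa i := by
  induction i with
  | zero => simp [pxor, pvGetDSetNe _ _ _ _ _ (by omega : (0:Nat) ≠ j)]
  | succ i ih =>
    simp [pxor, ih (by omega), pvGetDSetNe _ _ _ _ _ (by omega : i + 1 ≠ j)]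

theorem pvPxorSetZero (xa : List Int) (u : Int) (i : Nat) (h0 : 0 < xa.length) :
    pxor (xa.set 0 (PySem.Int.bxor (xa.getD 0 0) u)) i = PySem.Int.bxor (pxor xa i) u := by
  induction i with
  | zero => simp [pxor, List.getD_eq_getElem?_getD, pvGetDSetSelf _ _ _ _ h0]
  | succ i ih =>
    simp only [pxor, ih, pvGetDSetNe _ _ _ _ _ (by omega : i + 1 ≠ 0), pvBxorRightComm]

-- full characterisation of A's second loop after n steps
theorem pvLoop2Char (ans xa : List Int) (n : Nat) (hn : n ≤ ans.length) (hx : n ≤ xa.length) :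
    (List.range n).foldl xorStep2 (ans, xa) =
      (List.ofFn (fun i : Fin ans.length =>
          if i.1 < n then PySem.Int.bxor ans[i.1] (pxor xa i.1) else ans[i.1]),
       List.ofFn (fun i : Fin xa.length =>
          if 0 < i.1 ∧ i.1 < n then pxor xa i.1 else xa[i.1])) := by
  induction n with
  | zero => simp
  | succ n ih =>
    have hna : n < ans.length := hn
    have hnx : n < xa.length := hx
    rw [List.range_succ, List.foldl_append, ih (Nat.le_of_succ_le hn) (Nat.le_of_succ_le hx)]
    simp only [List.foldl_cons, List.foldl_nil, xorStep2, List.getD_eq_getElem?_getD]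
    rcases n with _ | m
    · rw [if_pos rfl]
      refine Prod.ext ?_ ?_
      · apply List.ext_getElem
        · simp
        · intro i hi1 hi2
          simp only [List.length_set, List.length_ofFn] at hi1 hi2
          simp only [List.getElem_set, List.getElem_ofFn]
          rcases Nat.eq_zero_or_pos i with hi | hi
          · subst hi
            rw [if_pos rfl, if_pos (by omega),
              pvGetDOfFn _ _ _ (show 0 < ans.length by omega),
              pvGetDOfFn _ _ _ (show 0 < xa.length by omega),
              if_neg (by omega), if_neg (by omega)]
            rw [show pxor xa 0 = xa[0]?.getD 0 from rfl]
            simp [show 0 < xa.length by omega]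
          · rw [if_neg (by omega), if_neg (by omega), if_neg (by omega)]
      · apply List.ext_getElem
        · simp
        · intro i hi1 hi2
          simp only [List.length_ofFn] at hi1 hi2
          simp only [List.getElem_ofFn]
          rw [if_neg (by omega), if_neg (by omega)]
    · rw [if_neg (by omega)]
      have hread : ∀ (k : Nat) (hk : k < xa.length),
          (List.ofFn (fun i : Fin xa.length =>
            if 0 < i.1 ∧ i.1 < m + 1 then pxor xa i.1 else xa[i.1]))[k]?.getD 0
          = if 0 < k ∧ k < m + 1 then pxor xa k else xa[k] := by
        intro k hk
        rw [pvGetDOfFn _ _ _ hk]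
      have hreadm : (List.ofFn (fun i : Fin xa.length =>
            if 0 < i.1 ∧ i.1 < m + 1 then pxor xa i.1 else xa[i.1]))[m]?.getD 0
          = pxor xa m := by
        rw [hread m (by omega)]
        rcases Nat.eq_zero_or_pos m with hm | hm
        · subst hm
          rw [if_neg (by omega)]
          rw [show pxor xa 0 = xa[0]?.getD 0 from rfl]
          simp [show 0 < xa.length by omega]
        · rw [if_pos ⟨hm, by omega⟩]
      have hreadm1 : (List.ofFn (fun i : Fin xa.length =>
            if 0 < i.1 ∧ i.1 < m + 1 then pxor xa i.1 else xa[i.1]))[m+1]?.getD 0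
          = xa[m+1]'(by omega) := by
        rw [hread (m+1) (by omega), if_neg (by omega)]
      rw [show m + 1 - 1 = m from rfl, hreadm, hreadm1]
      have hxa : (List.ofFn (fun i : Fin xa.length =>
            if 0 < i.1 ∧ i.1 < m + 1 then pxor xa i.1 else xa[i.1])).set (m+1)
              (PySem.Int.bxor (xa[m+1]'(by omega)) (pxor xa m))
          = List.ofFn (fun i : Fin xa.length =>
              if 0 < i.1 ∧ i.1 < m + 1 + 1 then pxor xa i.1 else xa[i.1]) := by
        apply List.ext_getElem
        · simp
        · intro i hi1 hi2
          simp only [List.length_set, List.length_ofFn] at hi1 hi2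
          simp only [List.getElem_set, List.getElem_ofFn]
          by_cases hi : m + 1 = i
          · subst hi
            rw [if_pos rfl, if_pos (by omega)]
            rw [show pxor xa (m+1) = PySem.Int.bxor (pxor xa m) (xa[m+1]?.getD 0) from rfl]
            rw [show (xa[m+1]?.getD 0 : Int) = xa[m+1]'(by omega) by simp [hi1]]
            rw [PySem.Int.bxor_comm]
          · rw [if_neg hi]
            by_cases hcond : 0 < i ∧ i < m + 1
            · rw [if_pos hcond, if_pos ⟨hcond.1, by omega⟩]
            · rw [if_neg hcond, if_neg (by omega)]
      rw [hxa]
      refine Prod.ext ?_ ?_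
      · dsimp only
        apply List.ext_getElem
        · simp
        · intro i hi1 hi2
          simp only [List.length_set, List.length_ofFn] at hi1 hi2
          simp only [List.getElem_set, List.getElem_ofFn]
          by_cases hi : m + 1 = i
          · subst hi
            rw [if_pos rfl, if_pos (by omega),
              pvGetDOfFn _ _ _ (show m + 1 < ans.length by omega)]
            dsimp only
            rw [if_neg (by omega)]
            rw [show ((List.ofFn (fun i : Fin xa.length =>
                if 0 < i.1 ∧ i.1 < m + 1 + 1 then pxor xa i.1 else xa[i.1]))[m+1]?.getD 0 : Int)
                = pxor xa (m+1) by
              rw [pvGetDOfFn _ _ _ (show m + 1 < xa.length by omega)]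
              dsimp only
              rw [if_pos (by omega)]]
          · rw [if_neg hi]
            by_cases hcond : i < m + 1
            · rw [if_pos hcond, if_pos (by omega)]
            · rw [if_neg hcond, if_neg (by omega)]
      · rfl

-- invariant of A's first loop
theorem pvGetConcat (l : List Int) (a : Int) : (l ++ [a])[l.length]'(by simp) = a := by
  simp

theorem pvLoop2Char' (st : List Int × List Int) (n : Nat)
    (hn : n ≤ st.1.length) (hx : n ≤ st.2.length) :
    (List.range n).foldl xorStep2 st =
      (List.ofFn (fun i : Fin st.1.length =>
          if i.1 < n then PySem.Int.bxor st.1[i.1] (pxor st.2 i.1) else st.1[i.1]),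
       List.ofFn (fun i : Fin st.2.length =>
          if 0 < i.1 ∧ i.1 < n then pxor st.2 i.1 else st.2[i.1])) := by
  obtain ⟨ans, xa⟩ := st
  exact pvLoop2Char ans xa n hn hx

theorem pvLoop1Inv (qs : List (List Int)) : ∀ (ans xa : List Int),
    xa.length = 10 ^ 5 + 1 →
    (∀ k, ans.length < k → xa[k]?.getD 0 = (0 : Int)) →
    pxor xa ans.length = 0 →
    ans.length + qs.countP (fun q => q.getD 0 0 == 1) ≤ 100000 →
    (qs.foldl xorStep1 (ans, xa)).2.length = 10 ^ 5 + 1 ∧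
    (∀ k, (qs.foldl xorStep1 (ans, xa)).1.length < k →
        (qs.foldl xorStep1 (ans, xa)).2[k]?.getD 0 = (0 : Int)) ∧
    pxor (qs.foldl xorStep1 (ans, xa)).2 (qs.foldl xorStep1 (ans, xa)).1.length = 0 ∧
    (qs.foldl xorStep1 (ans, xa)).1.length
      = ans.length + qs.countP (fun q => q.getD 0 0 == 1) := by
  induction qs with
  | nil =>
    intro ans xa hxlen hzero hpx hcnt
    exact ⟨hxlen, hzero, hpx, by simp⟩
  | cons q rest ih =>
    intro ans xa hxlen hzero hpx hcnt
    rw [List.foldl_cons]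
    by_cases hq : q.getD 0 0 = 1
    · have hqN : q[0]?.getD 0 = (1 : Int) := by
        rw [← List.getD_eq_getElem?_getD]; exact hq
      have hone : (q.getD 0 0 == 1) = true := by simp [List.getD_eq_getElem?_getD, hqN]
      have hcne : (q :: rest).countP (fun q => q.getD 0 0 == 1)
          = rest.countP (fun q => q.getD 0 0 == 1) + 1 := by
        rw [List.countP_cons, hone]
        simp
      rw [hcne] at hcnt ⊢
      have hstep : xorStep1 (ans, xa) q = (ans ++ [q.getD 1 0], xa) := by
        simp [xorStep1, hqN]
      rw [hstep]
      have h4 := ih (ans ++ [q.getD 1 0]) xa hxlen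
        (by
          intro k hk
          apply hzero
          simp only [List.length_append, List.length_cons, List.length_nil] at hk
          omega)
        (by
          rw [show (ans ++ [q.getD 1 0]).length = ans.length + 1 by simp]
          show PySem.Int.bxor (pxor xa ans.length) (xa[ans.length + 1]?.getD 0) = 0
          rw [hpx, hzero (ans.length + 1) (by omega)]
          simp)
        (by
          simp only [List.length_append, List.length_cons, List.length_nil]
          omega)
      refine ⟨h4.1, h4.2.1, h4.2.2.1, ?_⟩
      rw [h4.2.2.2]
      simp only [List.length_append, List.length_cons, List.length_nil]
      omega
    · have hqN : ¬ q[0]?.getD 0 = (1 : Int) := by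
        rw [← List.getD_eq_getElem?_getD]; exact hq
      have hone : (q.getD 0 0 == 1) = false := by simp [List.getD_eq_getElem?_getD, hqN]
      have hcne : (q :: rest).countP (fun q => q.getD 0 0 == 1)
          = rest.countP (fun q => q.getD 0 0 == 1) := by
        rw [List.countP_cons, hone]
        simp
      rw [hcne] at hcnt ⊢
      have hstep : xorStep1 (ans, xa) q =
          (ans, (xa.set 0 (PySem.Int.bxor (xa.getD 0 0) (q.getD 1 0))).set ans.length
            (PySem.Int.bxor
              ((xa.set 0 (PySem.Int.bxor (xa.getD 0 0) (q.getD 1 0))).getD ans.length 0)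
              (q.getD 1 0))) := by
        simp [xorStep1, hqN]
      rw [hstep]
      have hlenL : ans.length < xa.length := by omega
      have hlen0 : 0 < xa.length := by omega
      have hz2 : ∀ k, ans.length < k →
          ((xa.set 0 (PySem.Int.bxor (xa.getD 0 0) (q.getD 1 0))).set ans.length
            (PySem.Int.bxor
              ((xa.set 0 (PySem.Int.bxor (xa.getD 0 0) (q.getD 1 0))).getD ans.length 0)
              (q.getD 1 0)))[k]?.getD 0 = (0 : Int) := by
        intro k hk
        rw [pvGetDSetNe _ _ _ _ _ (by omega), pvGetDSetNe _ _ _ _ _ (by omega)]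
        exact hzero k hk
      have hpx2 : pxor ((xa.set 0 (PySem.Int.bxor (xa.getD 0 0) (q.getD 1 0))).set ans.length
            (PySem.Int.bxor
              ((xa.set 0 (PySem.Int.bxor (xa.getD 0 0) (q.getD 1 0))).getD ans.length 0)
              (q.getD 1 0))) ans.length = 0 := by
        rcases hL : ans.length with _ | m
        · rw [hL] at hlenL hpx
          show ((xa.set 0 (PySem.Int.bxor (xa.getD 0 0) (q.getD 1 0))).set 0
            (PySem.Int.bxor
              ((xa.set 0 (PySem.Int.bxor (xa.getD 0 0) (q.getD 1 0))).getD 0 0)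
              (q.getD 1 0)))[0]?.getD 0 = 0
          rw [pvGetDSetSelf _ _ _ _ (by simpa using hlen0)]
          rw [show ((xa.set 0 (PySem.Int.bxor (xa.getD 0 0) (q.getD 1 0))).getD 0 0 : Int)
              = PySem.Int.bxor (xa.getD 0 0) (q.getD 1 0) from by
            rw [List.getD_eq_getElem?_getD]
            exact pvGetDSetSelf _ _ _ _ hlen0]
          rw [pvBxorCancel]
          exact hpx
        · rw [hL] at hlenL hpx
          show PySem.Int.bxor
            (pxor ((xa.set 0 (PySem.Int.bxor (xa.getD 0 0) (q.getD 1 0))).set (m + 1)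
              (PySem.Int.bxor
                ((xa.set 0 (PySem.Int.bxor (xa.getD 0 0) (q.getD 1 0))).getD (m + 1) 0)
                (q.getD 1 0))) m)
            (((xa.set 0 (PySem.Int.bxor (xa.getD 0 0) (q.getD 1 0))).set (m + 1)
              (PySem.Int.bxor
                ((xa.set 0 (PySem.Int.bxor (xa.getD 0 0) (q.getD 1 0))).getD (m + 1) 0)
                (q.getD 1 0)))[m + 1]?.getD 0) = 0
          rw [pvPxorSetHigh _ _ _ _ (by omega), pvPxorSetZero xa (q.getD 1 0) m hlen0]
          rw [pvGetDSetSelf _ _ _ _ (by simpa using hlenL)]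
          rw [show ((xa.set 0 (PySem.Int.bxor (xa.getD 0 0) (q.getD 1 0))).getD (m + 1) 0 : Int)
              = xa[m + 1]?.getD 0 from by
            rw [List.getD_eq_getElem?_getD]
            exact pvGetDSetNe _ _ _ _ _ (by omega)]
          rw [pvBxorShuffle]
          exact hpx
      have h4 := ih ans _ (by simpa using hxlen) hz2 hpx2 (by omega)
      exact ⟨h4.1, h4.2.1, h4.2.2.1, h4.2.2.2⟩

theorem pvAEqSpec (qs : List (List Int))
    (hq : qs.countP (fun q => q.getD 0 0 == 1) ≤ 100000) :
    xorQuery qs = (specGo qs).1 := by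
  induction qs using List.reverseRecOn with
  | nil => rfl
  | append_singleton qs q ih =>
    have hq' : qs.countP (fun q => q.getD 0 0 == 1) ≤ 100000 := by
      rw [List.countP_append] at hq
      omega
    have hIH := ih hq'
    obtain ⟨hlen2, hz, hpx0, hlenans⟩ := pvLoop1Inv qs [] (List.replicate (10 ^ 5 + 1) 0)
      List.length_replicate
      (by intro k _; rw [List.getElem?_replicate]; split <;> rfl)
      (by
        show (List.replicate (10 ^ 5 + 1) (0 : Int))[0]?.getD 0 = 0
        rw [List.getElem?_replicate, if_pos (by norm_num : (0 : ℕ) < 10 ^ 5 + 1)]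
        rfl)
      (by simpa using hq')
    simp only [List.length_nil, Nat.zero_add] at hlenans
    have hxq : xorQuery (qs ++ [q]) =
        ((List.range ((qs ++ [q]).foldl xorStep1 ([], List.replicate (10 ^ 5 + 1) 0)).1.length).foldl
          xorStep2 ((qs ++ [q]).foldl xorStep1 ([], List.replicate (10 ^ 5 + 1) 0))).1 := rfl
    have hxq' : xorQuery qs =
        ((List.range (qs.foldl xorStep1 ([], List.replicate (10 ^ 5 + 1) 0)).1.length).foldl
          xorStep2 (qs.foldl xorStep1 ([], List.replicate (10 ^ 5 + 1) 0))).1 := rfl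
    set st := qs.foldl xorStep1 ([], List.replicate (10 ^ 5 + 1) 0) with hst
    have hL : st.1.length ≤ 100000 := by omega
    have hspec : (specGo qs).1 = List.ofFn (fun j : Fin st.1.length =>
        if j.1 < st.1.length then PySem.Int.bxor st.1[j.1] (pxor st.2 j.1) else st.1[j.1]) := by
      rw [← hIH, hxq', pvLoop2Char' st st.1.length le_rfl (by omega)]
    have hslen : (specGo qs).1.length = st.1.length := by
      rw [pvSpecLen, hlenans]
    rw [hxq, List.foldl_append, List.foldl_cons, List.foldl_nil]
    by_cases hq1 : q.getD 0 0 = 1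
    · have hq1N : q[0]?.getD 0 = (1 : Int) := by
        rw [← List.getD_eq_getElem?_getD]; exact hq1
      rw [show xorStep1 st q = (st.1 ++ [q.getD 1 0], st.2) from by simp [xorStep1, hq1N]]
      rw [pvSpecSnocOne qs q hq1]
      rw [pvLoop2Char' (st.1 ++ [q.getD 1 0], st.2) ((st.1 ++ [q.getD 1 0]).length)
        le_rfl (by simp only [List.length_append, List.length_cons, List.length_nil]; omega)]
      apply List.ext_getElem
      · simp [hslen]
      · intro i hi1 hi2
        simp only [List.length_ofFn, List.length_append, List.length_cons,
          List.length_nil] at hi1 hi2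
        rw [List.getElem_ofFn]
        dsimp only
        rw [if_pos (by simpa using hi1)]
        by_cases hiL : i < st.1.length
        · rw [List.getElem_append_left hiL,
            List.getElem_append_left (by omega : i < (specGo qs).1.length)]
          have hel : (specGo qs).1[i]'(by omega)
              = PySem.Int.bxor (st.1[i]'hiL) (pxor st.2 i) := by
            have h1 := congrArg (fun l => l[i]?) hspec
            simp only [List.getElem?_ofFn] at h1
            rw [List.getElem?_eq_getElem (by omega : i < (specGo qs).1.length)] at h1
            simp only [hiL, dif_pos, if_pos] at h1
            have h2 := Option.some.inj h1
            rw [h2]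
          rw [hel]
        · have hiEq : i = st.1.length := by omega
          subst hiEq
          rw [pvGetConcat st.1 (q.getD 1 0), hpx0]
          rw [show ((specGo qs).1 ++ [q.getD 1 0])[st.1.length]'(by simp [hslen])
              = q.getD 1 0 from by
            have h3 := pvGetConcat (specGo qs).1 (q.getD 1 0)
            simp only [hslen] at h3
            exact h3]
          simp
    · have hq1N : ¬ q[0]?.getD 0 = (1 : Int) := by
        rw [← List.getD_eq_getElem?_getD]; exact hq1
      rw [show xorStep1 st q =
          (st.1, (st.2.set 0 (PySem.Int.bxor (st.2.getD 0 0) (q.getD 1 0))).set st.1.length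
            (PySem.Int.bxor
              ((st.2.set 0 (PySem.Int.bxor (st.2.getD 0 0) (q.getD 1 0))).getD st.1.length 0)
              (q.getD 1 0))) from by simp [xorStep1, hq1N]]
      rw [pvSpecSnocUpd qs q hq1]
      rw [pvLoop2Char'
        (st.1, (st.2.set 0 (PySem.Int.bxor (st.2.getD 0 0) (q.getD 1 0))).set st.1.length
          (PySem.Int.bxor
            ((st.2.set 0 (PySem.Int.bxor (st.2.getD 0 0) (q.getD 1 0))).getD st.1.length 0)
            (q.getD 1 0)))
        st.1.length le_rfl (by simp only [List.length_set]; omega)]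
      apply List.ext_getElem
      · simp [hslen]
      · intro i hi1 hi2
        simp only [List.length_ofFn] at hi1
        rw [List.getElem_ofFn]
        dsimp only
        rw [if_pos (by simpa using hi1)]
        have hiL : i < st.1.length := by simpa using hi1
        have hpx2 : pxor ((st.2.set 0 (PySem.Int.bxor (st.2.getD 0 0) (q.getD 1 0))).set
            st.1.length
            (PySem.Int.bxor
              ((st.2.set 0 (PySem.Int.bxor (st.2.getD 0 0) (q.getD 1 0))).getD st.1.length 0)
              (q.getD 1 0))) i = PySem.Int.bxor (pxor st.2 i) (q.getD 1 0) := by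
          rw [pvPxorSetHigh _ _ _ _ hiL]
          exact pvPxorSetZero st.2 (q.getD 1 0) i (by omega)
        rw [hpx2, ← pvBxorAssoc]
        rw [List.getElem_map]
        have hel : (specGo qs).1[i]'(by omega)
            = PySem.Int.bxor (st.1[i]'hiL) (pxor st.2 i) := by
          have h1 := congrArg (fun l => l[i]?) hspec
          simp only [List.getElem?_ofFn] at h1
          rw [List.getElem?_eq_getElem (by omega : i < (specGo qs).1.length)] at h1
          simp only [hiL, dif_pos, if_pos] at h1
          have h2 := Option.some.inj h1
          rw [h2]
        rw [hel]

-- ===== VERDICT (by name: the statement is the Claim_ definition above) =====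
theorem xorQuery_spec : Claim_equal_xorQuery := by
  intro queries _ hpre
  unfold Spec_xorQuery
  rw [pvAltEqSpec]
  exact pvAEqSpec queries hpre.2
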